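-- pv_equiv track=rewrite | github.com/danielkorat/few_shot | few_shot/extract_aspects.py | generate_bio
-- ===== SOURCE A (Python) =====
-- def generate_bio(tokens, preds):
--     idx_all =[]
--     for pred in preds:
--         try:
--             idx = tokens.index(pred)
--             idx_all.append(idx)
--         except ValueError:
--             pass
--
--     pred_bio = ['B-ASP' if i in idx_all else 'O' for i in range(len(tokens))]
--
--     return pred_bio
-- ===== SOURCE B (Python) =====
-- def generate_bio(tokens, preds):
--     pred_bio = ['O'] * len(tokens)
--     for pred in preds:
--         try:
--             pred_bio[tokens.index(pred)] = 'B-ASP'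
--         except ValueError:
--             pass
--     return pred_bio
-- ===== Notes on version B (the rewrite author's own statement) =====
-- stated objective: simpler
-- what changed: B preallocates ['O']*len(tokens) and writes 'B-ASP' directly at each matched first index, dropping A's intermediate index list and its second full pass over range(len(tokens)) with a linear membership test per position.
import Mathlib
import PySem

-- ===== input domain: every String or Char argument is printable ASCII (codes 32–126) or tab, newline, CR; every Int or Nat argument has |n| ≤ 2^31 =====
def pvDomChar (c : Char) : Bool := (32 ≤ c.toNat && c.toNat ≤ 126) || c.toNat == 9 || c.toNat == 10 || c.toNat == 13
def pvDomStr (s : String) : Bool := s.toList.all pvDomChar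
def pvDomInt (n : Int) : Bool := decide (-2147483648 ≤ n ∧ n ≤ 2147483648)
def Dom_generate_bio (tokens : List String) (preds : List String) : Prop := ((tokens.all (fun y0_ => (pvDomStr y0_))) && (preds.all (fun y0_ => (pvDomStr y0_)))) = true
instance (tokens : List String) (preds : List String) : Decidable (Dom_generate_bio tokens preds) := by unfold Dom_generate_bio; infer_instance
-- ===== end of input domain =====

-- B preallocates the 'O' list and writes 'B-ASP' directly at each matched first index,
-- removing A's intermediate index list and its second pass over all positions (objective: simpler).


-- ===== PORT A =====
-- collect first-occurrence indices of each pred (ValueError → skip), then mark positions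
def generate_bio (tokens : List String) (preds : List String) : List String :=
  let idx_all := preds.foldl (fun acc pred =>
    match PySem.List.index? tokens pred with
    | some idx => acc ++ [idx]
    | none => acc) ([] : List Nat)
  (List.range tokens.length).map (fun i => if i ∈ idx_all then "B-ASP" else "O")

-- ===== PORT B =====
-- preallocate ['O'] * len(tokens); write 'B-ASP' at each matched first index
def generate_bio_alt (tokens : List String) (preds : List String) : List String :=
  preds.foldl (fun bio pred =>
    match PySem.List.index? tokens pred with
    | some idx => bio.set idx "B-ASP"
    | none => bio) (List.replicate tokens.length "O")

-- ===== PRECONDITION & SPEC =====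
def Spec_generate_bio (tokens : List String) (preds : List String) (out : List String) : Prop := out = generate_bio_alt tokens preds
instance (tokens : List String) (preds : List String) (out : List String) : Decidable (Spec_generate_bio tokens preds out) := by unfold Spec_generate_bio; infer_instance

-- ===== CLAIM (what is proved, stated in full; the proofs are below) =====
def Claim_equal_generate_bio : Prop := ∀ (tokens : List String) (preds : List String), Dom_generate_bio tokens preds → Spec_generate_bio tokens preds (generate_bio tokens preds)

-- ===== LEMMAS AND PROOFS =====

-- A's index list: membership characterisation
theorem memA (tokens : List String) (preds : List String) (acc : List Nat) (i : Nat) :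
    i ∈ preds.foldl (fun acc pred =>
      match PySem.List.index? tokens pred with
      | some idx => acc ++ [idx]
      | none => acc) acc ↔ i ∈ acc ∨ ∃ p ∈ preds, PySem.List.index? tokens p = some i := by
  induction preds generalizing acc with
  | nil => simp
  | cons p ps ih =>
    simp only [List.foldl_cons]
    cases h : PySem.List.index? tokens p with
    | none =>
      rw [ih]
      simp only [List.mem_cons]
      constructor
      · rintro (ha | ⟨q, hq, hqi⟩)
        · exact Or.inl ha
        · exact Or.inr ⟨q, Or.inr hq, hqi⟩
      · rintro (ha | ⟨q, (rfl | hq), hqi⟩)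
        · exact Or.inl ha
        · rw [h] at hqi; cases hqi
        · exact Or.inr ⟨q, hq, hqi⟩
    | some idx =>
      rw [ih]
      simp only [List.mem_append, List.mem_cons, List.not_mem_nil, or_false]
      constructor
      · rintro ((ha | rfl) | ⟨q, hq, hqi⟩)
        · exact Or.inl ha
        · exact Or.inr ⟨p, Or.inl rfl, h⟩
        · exact Or.inr ⟨q, Or.inr hq, hqi⟩
      · rintro (ha | ⟨q, (rfl | hq), hqi⟩)
        · exact Or.inl (Or.inl ha)
        · rw [h] at hqi; exact Or.inl (Or.inr (Option.some_injective _ hqi).symm)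
        · exact Or.inr ⟨q, hq, hqi⟩

-- B's fold: preserves length and sets exactly the matched first indices
theorem foldB_spec (tokens : List String) (preds : List String) (bio : List String)
    (hlen : bio.length = tokens.length) :
    (preds.foldl (fun bio pred =>
      match PySem.List.index? tokens pred with
      | some idx => bio.set idx "B-ASP"
      | none => bio) bio).length = tokens.length ∧
    ∀ k, (preds.foldl (fun bio pred =>
      match PySem.List.index? tokens pred with
      | some idx => bio.set idx "B-ASP"
      | none => bio) bio)[k]? =
      if ∃ p ∈ preds, PySem.List.index? tokens p = some k then
        (if k < tokens.length then some "B-ASP" else none)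
      else bio[k]? := by
  induction preds generalizing bio with
  | nil =>
    refine ⟨hlen, fun k => ?_⟩
    simp only [List.foldl_nil]
    rw [if_neg]; rintro ⟨p, hp, _⟩; simp at hp
  | cons p ps ih =>
    simp only [List.foldl_cons]
    cases h : PySem.List.index? tokens p with
    | none =>
      obtain ⟨h1, h2⟩ := ih bio hlen
      refine ⟨h1, fun k => ?_⟩
      rw [h2 k]
      congr 1
      simp only [List.mem_cons, eq_iff_iff]
      constructor
      · rintro ⟨q, hq, hqi⟩; exact ⟨q, Or.inr hq, hqi⟩
      · rintro ⟨q, (rfl | hq), hqi⟩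
        · rw [h] at hqi; cases hqi
        · exact ⟨q, hq, hqi⟩
    | some idx =>
      obtain ⟨hidx, -, -⟩ := PySem.List.getElem_of_index?_eq_some h
      have hlen' : (bio.set idx "B-ASP").length = tokens.length := by
        simpa using hlen
      obtain ⟨h1, h2⟩ := ih (bio.set idx "B-ASP") hlen'
      refine ⟨h1, fun k => ?_⟩
      rw [h2 k]
      by_cases hk : k = idx
      · subst hk
        have hex : ∃ q ∈ p :: ps, PySem.List.index? tokens q = some k := ⟨p, List.mem_cons_self .., h⟩
        rw [if_pos hex, if_pos hidx]
        by_cases hps : ∃ q ∈ ps, PySem.List.index? tokens q = some k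
        · rw [if_pos hps]
        · rw [if_neg hps]
          have hb : k < bio.length := hlen ▸ hidx
          simp [List.getElem?_set_self, hb]
      · have hset : (bio.set idx "B-ASP")[k]? = bio[k]? := List.getElem?_set_ne (by omega)
        rw [hset]
        congr 1
        simp only [List.mem_cons, eq_iff_iff]
        constructor
        · rintro ⟨q, hq, hqi⟩; exact ⟨q, Or.inr hq, hqi⟩
        · rintro ⟨q, (rfl | hq), hqi⟩
          · rw [h] at hqi; exact absurd (Option.some_injective _ hqi).symm hk
          · exact ⟨q, hq, hqi⟩

-- ===== VERDICT (by name: the statement is the Claim_ definition above) =====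
theorem generate_bio_spec : Claim_equal_generate_bio := by
  intro tokens preds _
  show _ = _
  unfold generate_bio generate_bio_alt
  obtain ⟨hlen, hget⟩ := foldB_spec tokens preds (List.replicate tokens.length "O") (by simp)
  apply List.ext_getElem?
  intro k
  rw [hget k]
  by_cases hk : k < tokens.length
  · rw [List.getElem?_map, List.getElem?_range hk]
    simp only [Option.map_some]
    simp only [memA]
    simp only [List.not_mem_nil, false_or]
    split_ifs with hex
    · rfl
    · rw [List.getElem?_replicate, if_pos hk]
  · rw [List.getElem?_map, List.getElem?_eq_none (by simpa using not_lt.mp hk)]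
    simp only [Option.map_none]
    split_ifs
    · rfl
    · rw [List.getElem?_replicate, if_neg hk]
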